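-- pv_equiv track=rewrite | github.com/vm-dataset/O_36_grid_shift_data_generator | src/generator.py | _get_valid_positions
-- ===== SOURCE A (Python) =====
-- from typing import List, Tuple, Optional, Dict, Any
--
-- DIRECTIONS = {
--     "up": (-1, 0),
--     "down": (1, 0),
--     "left": (0, -1),
--     "right": (0, 1),
-- }
--
-- def _get_valid_positions(grid_size: int, direction: str, steps: int) -> List[Tuple[int, int]]:
--     """Get valid starting positions that won't go out of bounds when shifted."""
--     dr, dc = DIRECTIONS[direction]
--
--     # Calculate valid row range
--     if dr == -1:  # up
--         row_range = range(steps, grid_size)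
--     elif dr == 1:  # down
--         row_range = range(0, grid_size - steps)
--     else:
--         row_range = range(0, grid_size)
--
--     # Calculate valid column range
--     if dc == -1:  # left
--         col_range = range(steps, grid_size)
--     elif dc == 1:  # right
--         col_range = range(0, grid_size - steps)
--     else:
--         col_range = range(0, grid_size)
--
--     return [(r, c) for r in row_range for c in col_range]
-- ===== SOURCE B (Python) =====
-- from typing import List, Tuple
--
-- DIRECTIONS = {
--     "up": (-1, 0),
--     "down": (1, 0),
--     "left": (0, -1),
--     "right": (0, 1),
-- }
--
-- def _get_valid_positions(grid_size: int, direction: str, steps: int) -> List[Tuple[int, int]]: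
--     """Scan every cell and keep those whose shifted target stays inside the grid."""
--     dr, dc = DIRECTIONS[direction]
--     result = []
--     for r in range(grid_size):
--         for c in range(grid_size):
--             nr = r + dr * steps
--             nc = c + dc * steps
--             if 0 <= nr < grid_size and 0 <= nc < grid_size:
--                 result.append((r, c))
--     return result
-- ===== Notes on version B (the rewrite author's own statement) =====
-- stated objective: alternative
-- what changed: B replaces A's per-direction analytic range computation (branching on dr/dc to build row/column ranges, then a Cartesian product) with a uniform scan of all grid cells that keeps (r,c) exactly when the shifted target cell r+dr*steps, c+dc*steps lies in bounds.
-- intended difference: For negative steps (with a valid direction and grid_size >= 1) A returns start positions outside the grid (e.g. row -1 or row grid_size), an artefact of its range arithmetic; B returns only in-grid cells whose shifted target is in bounds, which is the intended meaning of 'valid starting positions'. — e.g. on _get_valid_positions(1, "up", -1): A returns [(-1, 0), (0, 0)], B returns []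
import Mathlib
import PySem

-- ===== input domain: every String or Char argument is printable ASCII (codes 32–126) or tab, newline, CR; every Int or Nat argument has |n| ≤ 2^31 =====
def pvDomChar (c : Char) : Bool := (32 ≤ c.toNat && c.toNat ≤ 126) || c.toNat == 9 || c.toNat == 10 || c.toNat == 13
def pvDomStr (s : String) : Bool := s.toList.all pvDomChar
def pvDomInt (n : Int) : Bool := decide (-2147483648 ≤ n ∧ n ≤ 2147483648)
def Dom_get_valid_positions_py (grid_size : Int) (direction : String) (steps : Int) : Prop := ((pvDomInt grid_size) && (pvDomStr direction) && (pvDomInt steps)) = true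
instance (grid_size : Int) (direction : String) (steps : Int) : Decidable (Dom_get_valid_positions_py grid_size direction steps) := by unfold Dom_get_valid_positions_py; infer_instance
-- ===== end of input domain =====

-- B replaces A's per-direction range arithmetic + Cartesian product by a uniform scan of all
-- cells keeping those whose shifted target stays in bounds (alternative, same cost).

-- ===== PORT A =====
-- module-level DIRECTIONS dict (shared by both Python files)
def pyDIRECTIONS : PySem.Dict String (Int × Int) :=
  ((((PySem.Dict.empty).insert "up" (-1, 0)).insert "down" (1, 0)).insert "left" (0, -1)).insert "right" (0, 1)

def get_valid_positions_py (grid_size : Int) (direction : String) (steps : Int) : List (Int × Int) :=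
  match PySem.Dict.get? pyDIRECTIONS direction with
  | none => []   -- Python raises KeyError here; excluded by Pre_
  | some (dr, dc) =>
      let row_range : List Int :=
        if dr = -1 then PySem.List.pyRange steps grid_size 1
        else if dr = 1 then PySem.List.pyRange 0 (grid_size - steps) 1
        else PySem.List.pyRange 0 grid_size 1
      let col_range : List Int :=
        if dc = -1 then PySem.List.pyRange steps grid_size 1
        else if dc = 1 then PySem.List.pyRange 0 (grid_size - steps) 1
        else PySem.List.pyRange 0 grid_size 1
      row_range.flatMap (fun r => col_range.map (fun c => (r, c)))

-- ===== PORT B =====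
def get_valid_positions_py_alt (grid_size : Int) (direction : String) (steps : Int) : List (Int × Int) :=
  match PySem.Dict.get? pyDIRECTIONS direction with
  | none => []   -- Python raises KeyError here; excluded by Pre_
  | some (dr, dc) =>
      (PySem.List.pyRange 0 grid_size 1).foldl (fun acc r =>
        (PySem.List.pyRange 0 grid_size 1).foldl (fun acc c =>
          let nr := r + dr * steps
          let nc := c + dc * steps
          if 0 ≤ nr ∧ nr < grid_size ∧ 0 ≤ nc ∧ nc < grid_size then acc ++ [(r, c)] else acc)
          acc) []

-- ===== PRECONDITION & SPEC =====
-- Pre_ excludes exactly the directions not in DIRECTIONS, on which Python A raises KeyError.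
def Pre_get_valid_positions_py (grid_size : Int) (direction : String) (steps : Int) : Prop :=
  direction = "up" ∨ direction = "down" ∨ direction = "left" ∨ direction = "right"
instance (grid_size : Int) (direction : String) (steps : Int) : Decidable (Pre_get_valid_positions_py grid_size direction steps) := by unfold Pre_get_valid_positions_py; infer_instance
def pvWitness_get_valid_positions_py : Int × String × Int := (3, "up", 1)

-- For negative steps (valid direction, grid_size ≥ 1) A returns start positions outside the grid
-- (its range arithmetic produces rows/columns like -1 or grid_size); B returns only in-grid cells
-- whose shifted target is in bounds, the intended meaning of 'valid starting positions'.
def D_get_valid_positions_py (grid_size : Int) (direction : String) (steps : Int) : Prop :=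
  (direction = "up" ∨ direction = "down" ∨ direction = "left" ∨ direction = "right") ∧ steps < 0 ∧ 1 ≤ grid_size
instance (grid_size : Int) (direction : String) (steps : Int) : Decidable (D_get_valid_positions_py grid_size direction steps) := by unfold D_get_valid_positions_py; infer_instance

def Spec_get_valid_positions_py (grid_size : Int) (direction : String) (steps : Int) (out : List (Int × Int)) : Prop := ¬ D_get_valid_positions_py grid_size direction steps → out = get_valid_positions_py_alt grid_size direction steps
instance (grid_size : Int) (direction : String) (steps : Int) (out : List (Int × Int)) : Decidable (Spec_get_valid_positions_py grid_size direction steps out) := by unfold Spec_get_valid_positions_py; infer_instance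

def pvDiffWitness_get_valid_positions_py : Int × String × Int := (1, "up", -1)
def pvDiffWitnessOut_get_valid_positions_py : (List (Int × Int)) × (List (Int × Int)) := ([(-1, 0), (0, 0)], [])

-- ===== CLAIM (what is proved, stated in full; the proofs are below) =====
def Claim_unchanged_get_valid_positions_py : Prop := ∀ (grid_size : Int) (direction : String) (steps : Int), Dom_get_valid_positions_py grid_size direction steps → Pre_get_valid_positions_py grid_size direction steps → Spec_get_valid_positions_py grid_size direction steps (get_valid_positions_py grid_size direction steps)
def Claim_changed_get_valid_positions_py : Prop := Dom_get_valid_positions_py (pvDiffWitness_get_valid_positions_py.1) (pvDiffWitness_get_valid_positions_py.2.1) (pvDiffWitness_get_valid_positions_py.2.2) ∧ Pre_get_valid_positions_py (pvDiffWitness_get_valid_positions_py.1) (pvDiffWitness_get_valid_positions_py.2.1) (pvDiffWitness_get_valid_positions_py.2.2) ∧ D_get_valid_positions_py (pvDiffWitness_get_valid_positions_py.1) (pvDiffWitness_get_valid_positions_py.2.1) (pvDiffWitness_get_valid_positions_py.2.2) ∧ get_valid_positions_py (pvDiffWitness_get_valid_positions_py.1) (pvDiffWitness_get_valid_positions_py.2.1)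 (pvDiffWitness_get_valid_positions_py.2.2) = pvDiffWitnessOut_get_valid_positions_py.1 ∧ get_valid_positions_py_alt (pvDiffWitness_get_valid_positions_py.1) (pvDiffWitness_get_valid_positions_py.2.1) (pvDiffWitness_get_valid_positions_py.2.2) = pvDiffWitnessOut_get_valid_positions_py.2 ∧ pvDiffWitnessOut_get_valid_positions_py.1 ≠ pvDiffWitnessOut_get_valid_positions_py.2
def Claim_exact_get_valid_positions_py : Prop := ∀ (grid_size : Int) (direction : String) (steps : Int), Dom_get_valid_positions_py grid_size direction steps → Pre_get_valid_positions_py grid_size direction steps → D_get_valid_positions_py grid_size direction steps → get_valid_positions_py grid_size direction steps ≠ get_valid_positions_py_alt grid_size direction steps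

-- ===== LEMMAS AND PROOFS =====

-- B's nested append-loop with a separable in-bounds condition, rewritten as filter/flatMap
lemma nested_foldl (rows cols : List Int) (C : Int → Int → Prop) [inst : ∀ r c, Decidable (C r c)]
    (q p : Int → Bool) (hC : ∀ r c, C r c ↔ (q r && p c) = true) (init : List (Int × Int)) :
    rows.foldl (fun acc r => cols.foldl (fun acc c => if C r c then acc ++ [(r, c)] else acc) acc) init
    = init ++ (rows.filter q).flatMap (fun r => (cols.filter p).map (fun c => (r, c))) := by
  induction rows generalizing init with
  | nil => simp
  | cons r rows ih =>
    simp only [List.foldl_cons]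
    have hinner : cols.foldl (fun acc c => if C r c then acc ++ [(r, c)] else acc) init
        = init ++ (cols.filter (fun c => q r && p c)).map (fun c => (r, c)) := by
      rw [PySem.List.foldl_append_ite (p := fun c => C r c) (f := fun c => (r, c))]
      congr 1
      apply congrArg (List.map _)
      apply List.filter_congr
      intro c _
      cases hqp : (q r && p c) with
      | true => simp [(hC r c).mpr hqp]
      | false =>
          have hc : ¬ C r c := fun hc => by simp [(hC r c).mp hc] at hqp
          simp [hc]
    rw [ih, hinner]
    by_cases hq : q r = true
    · simp [hq, List.append_assoc]
    · rw [Bool.not_eq_true] at hq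
      simp [hq]

-- A's value per direction
lemma A_up (g s : Int) : get_valid_positions_py g "up" s
    = (PySem.List.pyRange s g 1).flatMap (fun r => (PySem.List.pyRange 0 g 1).map (fun c => (r, c))) := rfl
lemma A_down (g s : Int) : get_valid_positions_py g "down" s
    = (PySem.List.pyRange 0 (g - s) 1).flatMap (fun r => (PySem.List.pyRange 0 g 1).map (fun c => (r, c))) := rfl
lemma A_left (g s : Int) : get_valid_positions_py g "left" s
    = (PySem.List.pyRange 0 g 1).flatMap (fun r => (PySem.List.pyRange s g 1).map (fun c => (r, c))) := rfl
lemma A_right (g s : Int) : get_valid_positions_py g "right" s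
    = (PySem.List.pyRange 0 g 1).flatMap (fun r => (PySem.List.pyRange 0 (g - s) 1).map (fun c => (r, c))) := rfl

-- B's value per direction, in filter/flatMap form
lemma B_up (g s : Int) : get_valid_positions_py_alt g "up" s
    = ((PySem.List.pyRange 0 g 1).filter (fun r => decide (s ≤ r ∧ r < g + s))).flatMap
        (fun r => ((PySem.List.pyRange 0 g 1).filter (fun c => decide (0 ≤ c ∧ c < g))).map (fun c => (r, c))) := by
  show (PySem.List.pyRange 0 g 1).foldl _ [] = _
  rw [nested_foldl (C := fun r c => 0 ≤ r + (-1) * s ∧ r + (-1) * s < g ∧ 0 ≤ c + 0 * s ∧ c + 0 * s < g)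
        (q := fun r => decide (s ≤ r ∧ r < g + s)) (p := fun c => decide (0 ≤ c ∧ c < g))
        (hC := by intro r c; simp only [Bool.and_eq_true, decide_eq_true_eq]; omega)]
  rw [List.nil_append]
lemma B_down (g s : Int) : get_valid_positions_py_alt g "down" s
    = ((PySem.List.pyRange 0 g 1).filter (fun r => decide (-s ≤ r ∧ r < g - s))).flatMap
        (fun r => ((PySem.List.pyRange 0 g 1).filter (fun c => decide (0 ≤ c ∧ c < g))).map (fun c => (r, c))) := by
  show (PySem.List.pyRange 0 g 1).foldl _ [] = _
  rw [nested_foldl (C := fun r c => 0 ≤ r + 1 * s ∧ r + 1 * s < g ∧ 0 ≤ c + 0 * s ∧ c + 0 * s < g)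
        (q := fun r => decide (-s ≤ r ∧ r < g - s)) (p := fun c => decide (0 ≤ c ∧ c < g))
        (hC := by intro r c; simp only [Bool.and_eq_true, decide_eq_true_eq]; omega)]
  rw [List.nil_append]
lemma B_left (g s : Int) : get_valid_positions_py_alt g "left" s
    = ((PySem.List.pyRange 0 g 1).filter (fun r => decide (0 ≤ r ∧ r < g))).flatMap
        (fun r => ((PySem.List.pyRange 0 g 1).filter (fun c => decide (s ≤ c ∧ c < g + s))).map (fun c => (r, c))) := by
  show (PySem.List.pyRange 0 g 1).foldl _ [] = _
  rw [nested_foldl (C := fun r c => 0 ≤ r + 0 * s ∧ r + 0 * s < g ∧ 0 ≤ c + (-1) * s ∧ c + (-1) * s < g)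
        (q := fun r => decide (0 ≤ r ∧ r < g)) (p := fun c => decide (s ≤ c ∧ c < g + s))
        (hC := by intro r c; simp only [Bool.and_eq_true, decide_eq_true_eq]; omega)]
  rw [List.nil_append]
lemma B_right (g s : Int) : get_valid_positions_py_alt g "right" s
    = ((PySem.List.pyRange 0 g 1).filter (fun r => decide (0 ≤ r ∧ r < g))).flatMap
        (fun r => ((PySem.List.pyRange 0 g 1).filter (fun c => decide (-s ≤ c ∧ c < g - s))).map (fun c => (r, c))) := by
  show (PySem.List.pyRange 0 g 1).foldl _ [] = _
  rw [nested_foldl (C := fun r c => 0 ≤ r + 0 * s ∧ r + 0 * s < g ∧ 0 ≤ c + 1 * s ∧ c + 1 * s < g)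
        (q := fun r => decide (0 ≤ r ∧ r < g)) (p := fun c => decide (-s ≤ c ∧ c < g - s))
        (hC := by intro r c; simp only [Bool.and_eq_true, decide_eq_true_eq]; omega)]
  rw [List.nil_append]

-- what the three filter shapes give on range(0, g)
lemma filter_full (g : Int) :
    (PySem.List.pyRange 0 g 1).filter (fun x => decide (0 ≤ x ∧ x < g)) = PySem.List.pyRange 0 g 1 := by
  apply List.filter_eq_self.mpr
  intro a ha
  rw [PySem.List.mem_pyRange_one] at ha
  simp only [decide_eq_true_eq]
  omega
lemma filter_up (g s : Int) (hs : 0 ≤ s) :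
    (PySem.List.pyRange 0 g 1).filter (fun x => decide (s ≤ x ∧ x < g + s)) = PySem.List.pyRange s g 1 := by
  by_cases hsg : s ≤ g
  · rw [PySem.List.pyRange_one_append 0 s g hs hsg, List.filter_append]
    have h1 : (PySem.List.pyRange 0 s 1).filter (fun x => decide (s ≤ x ∧ x < g + s)) = [] := by
      apply List.filter_eq_nil_iff.mpr
      intro a ha
      rw [PySem.List.mem_pyRange_one] at ha
      simp only [decide_eq_true_eq]
      omega
    have h2 : (PySem.List.pyRange s g 1).filter (fun x => decide (s ≤ x ∧ x < g + s)) = PySem.List.pyRange s g 1 := by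
      apply List.filter_eq_self.mpr
      intro a ha
      rw [PySem.List.mem_pyRange_one] at ha
      simp only [decide_eq_true_eq]
      omega
    rw [h1, h2, List.nil_append]
  · rw [show PySem.List.pyRange s g 1 = [] from PySem.List.pyRange_one_eq_nil (by omega)]
    apply List.filter_eq_nil_iff.mpr
    intro a ha
    rw [PySem.List.mem_pyRange_one] at ha
    simp only [decide_eq_true_eq]
    omega
lemma filter_down (g s : Int) (hs : 0 ≤ s) :
    (PySem.List.pyRange 0 g 1).filter (fun x => decide (-s ≤ x ∧ x < g - s)) = PySem.List.pyRange 0 (g - s) 1 := by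
  by_cases hgs : 0 ≤ g - s
  · rw [PySem.List.pyRange_one_append 0 (g - s) g hgs (by omega), List.filter_append]
    have h1 : (PySem.List.pyRange 0 (g - s) 1).filter (fun x => decide (-s ≤ x ∧ x < g - s)) = PySem.List.pyRange 0 (g - s) 1 := by
      apply List.filter_eq_self.mpr
      intro a ha
      rw [PySem.List.mem_pyRange_one] at ha
      simp only [decide_eq_true_eq]
      omega
    have h2 : (PySem.List.pyRange (g - s) g 1).filter (fun x => decide (-s ≤ x ∧ x < g - s)) = [] := by
      apply List.filter_eq_nil_iff.mpr
      intro a ha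
      rw [PySem.List.mem_pyRange_one] at ha
      simp only [decide_eq_true_eq]
      omega
    rw [h1, h2, List.append_nil]
  · rw [show PySem.List.pyRange 0 (g - s) 1 = [] from PySem.List.pyRange_one_eq_nil (by omega)]
    apply List.filter_eq_nil_iff.mpr
    intro a ha
    rw [PySem.List.mem_pyRange_one] at ha
    simp only [decide_eq_true_eq]
    omega

-- every element B produces lies inside the grid
lemma mem_B_bounds {g : Int} {q p : Int → Bool} {x : Int × Int}
    (hx : x ∈ ((PySem.List.pyRange 0 g 1).filter q).flatMap
        (fun r => ((PySem.List.pyRange 0 g 1).filter p).map (fun c => (r, c)))) :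
    0 ≤ x.1 ∧ x.1 < g ∧ 0 ≤ x.2 ∧ x.2 < g := by
  rw [List.mem_flatMap] at hx
  obtain ⟨r, hr, hx⟩ := hx
  rw [List.mem_map] at hx
  obtain ⟨c, hc, rfl⟩ := hx
  rw [List.mem_filter, PySem.List.mem_pyRange_one] at hr hc
  exact ⟨hr.1.1, hr.1.2, hc.1.1, hc.1.2⟩

-- ===== VERDICT (by name: the statement is the Claim_ definition above) =====
theorem get_valid_positions_py_spec : Claim_unchanged_get_valid_positions_py := by
  intro g dir s _ hpre hnd
  have hz : PySem.List.pyRange 0 g 1 = [] ∨ 0 ≤ s := by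
    by_cases hs : 0 ≤ s
    · exact Or.inr hs
    · left
      apply PySem.List.pyRange_one_eq_nil
      by_contra hg
      exact hnd ⟨hpre, by omega, by omega⟩
  rcases hpre with h | h | h | h <;> subst h
  · rcases hz with h0 | hs
    · rw [A_up, B_up]; simp [h0]
    · rw [A_up, B_up, filter_up g s hs, filter_full]
  · rcases hz with h0 | hs
    · rw [A_down, B_down]; simp [h0]
    · rw [A_down, B_down, filter_down g s hs, filter_full]
  · rcases hz with h0 | hs
    · rw [A_left, B_left]; simp [h0]
    · rw [A_left, B_left, filter_up g s hs, filter_full]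
  · rcases hz with h0 | hs
    · rw [A_right, B_right]; simp [h0]
    · rw [A_right, B_right, filter_down g s hs, filter_full]
theorem get_valid_positions_py_changed : Claim_changed_get_valid_positions_py := by unfold Claim_changed_get_valid_positions_py; decide
theorem get_valid_positions_py_tight : Claim_exact_get_valid_positions_py := by
  intro g dir s _ _ hd heq
  obtain ⟨hpre, hs, hg⟩ := hd
  rcases hpre with h | h | h | h <;> subst h
  · have hmem : ((s, 0) : Int × Int) ∈ get_valid_positions_py g "up" s := by
      rw [A_up, List.mem_flatMap]
      exact ⟨s, PySem.List.mem_pyRange_one.mpr (by omega),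
        List.mem_map.mpr ⟨0, PySem.List.mem_pyRange_one.mpr (by omega), rfl⟩⟩
    rw [heq, B_up] at hmem
    have := mem_B_bounds hmem
    omega
  · have hmem : ((g, 0) : Int × Int) ∈ get_valid_positions_py g "down" s := by
      rw [A_down, List.mem_flatMap]
      exact ⟨g, PySem.List.mem_pyRange_one.mpr (by omega),
        List.mem_map.mpr ⟨0, PySem.List.mem_pyRange_one.mpr (by omega), rfl⟩⟩
    rw [heq, B_down] at hmem
    have := mem_B_bounds hmem
    omega
  · have hmem : ((0, s) : Int × Int) ∈ get_valid_positions_py g "left" s := by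
      rw [A_left, List.mem_flatMap]
      exact ⟨0, PySem.List.mem_pyRange_one.mpr (by omega),
        List.mem_map.mpr ⟨s, PySem.List.mem_pyRange_one.mpr (by omega), rfl⟩⟩
    rw [heq, B_left] at hmem
    have := mem_B_bounds hmem
    omega
  · have hmem : ((0, g) : Int × Int) ∈ get_valid_positions_py g "right" s := by
      rw [A_right, List.mem_flatMap]
      exact ⟨0, PySem.List.mem_pyRange_one.mpr (by omega),
        List.mem_map.mpr ⟨g, PySem.List.mem_pyRange_one.mpr (by omega), rfl⟩⟩
    rw [heq, B_right] at hmem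
    have := mem_B_bounds hmem
    omega
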